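-- pv_equiv track=rewrite | github.com/anastasiasenyk/discrete_project_11 | isomorphism.py | vertices_check_directed
-- ===== SOURCE A (Python) =====
-- def vertices_check_directed(connected_vert_1: list, connected_vert_2: list,
--                             deg_graph_1: dict, deg_graph_2: dict) -> bool:
--     """
--     Check whether two vertices are connected with vertices which have same
--     in-degrees and out-degrees.
--     Args:
--         connected_vert_1: list of adjacent vertices of first vertice
--         connected_vert_2: list of adjacent vertices of second vertice
--         deg_graph_1: dict, where keys are vertices of first graph and
--             values are lists, where first element is out-degree, second - in-degree
--         deg_graph_2: dict, where keys are vertices of second graph and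
--             values are lists, where first element is out-degree, second - in-degree
--     Returns:
--         bool: True if adjacent vertices of two given vertices have same
--             in-degrees and out-degrees, False if don't
--     """
--     deg_connected_1 = {}
--     deg_connected_2 = {}
--
--     for vert in connected_vert_1:
--         if tuple(deg_graph_1[vert]) not in deg_connected_1.keys():
--             deg_connected_1[tuple(deg_graph_1[vert])] = 1
--         else:
--             deg_connected_1[tuple(deg_graph_1[vert])] += 1
--
--     for vert in connected_vert_2:
--         if tuple(deg_graph_2[vert]) not in deg_connected_2.keys():
--             deg_connected_2[tuple(deg_graph_2[vert])] = 1
--         else: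
--             deg_connected_2[tuple(deg_graph_2[vert])] += 1
--
--     if deg_connected_1 == deg_connected_2:
--         return True
--     else:
--         return False
-- ===== SOURCE B (Python) =====
-- def vertices_check_directed(connected_vert_1: list, connected_vert_2: list,
--                             deg_graph_1: dict, deg_graph_2: dict) -> bool:
--     """Multiset comparison by sort-and-compare instead of counting dicts."""
--     return sorted(tuple(deg_graph_1[v]) for v in connected_vert_1) == \
--            sorted(tuple(deg_graph_2[v]) for v in connected_vert_2)
-- ===== Notes on version B (the rewrite author's own statement) =====
-- stated objective: idiomatic
-- what changed: Replaces the two hand-built frequency dicts and their dict comparison with a one-line sort-and-compare of the two degree-tuple sequences.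
import Mathlib
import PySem

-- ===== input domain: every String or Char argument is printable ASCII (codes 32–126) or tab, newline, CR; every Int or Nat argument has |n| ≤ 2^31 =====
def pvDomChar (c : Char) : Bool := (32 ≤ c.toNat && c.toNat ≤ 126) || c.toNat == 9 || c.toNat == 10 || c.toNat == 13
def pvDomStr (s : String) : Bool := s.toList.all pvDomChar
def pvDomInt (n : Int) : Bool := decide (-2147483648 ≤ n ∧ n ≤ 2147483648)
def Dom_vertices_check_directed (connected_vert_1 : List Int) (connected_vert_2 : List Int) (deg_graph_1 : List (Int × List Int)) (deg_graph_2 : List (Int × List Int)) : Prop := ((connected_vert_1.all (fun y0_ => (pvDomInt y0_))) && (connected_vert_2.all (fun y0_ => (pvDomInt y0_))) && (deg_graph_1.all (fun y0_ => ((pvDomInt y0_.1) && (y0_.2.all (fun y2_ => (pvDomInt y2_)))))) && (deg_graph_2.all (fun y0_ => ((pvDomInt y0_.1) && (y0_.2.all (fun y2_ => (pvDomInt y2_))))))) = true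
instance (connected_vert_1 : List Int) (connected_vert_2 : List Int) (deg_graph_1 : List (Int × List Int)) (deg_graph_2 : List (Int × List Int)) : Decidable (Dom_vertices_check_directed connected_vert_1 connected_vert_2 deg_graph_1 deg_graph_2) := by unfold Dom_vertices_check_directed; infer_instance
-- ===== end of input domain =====

-- B replaces A's two hand-built frequency dicts (and the dict == test) with a sort-and-compare
-- of the two degree-tuple sequences (objective: idiomatic, not faster).

-- ===== PORT A =====
-- deg_graph[vert]: association-list dict lookup, first match (none = KeyError)
def pvDegLookup (dg : List (Int × List Int)) (v : Int) : Option (List Int) :=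
  dg.lookup v

-- A's counting loop: 'for vert in connected_vert: if tuple(deg_graph[vert]) not in d.keys(): d[…]=1 else: d[…]+=1'
-- (none once a lookup raises KeyError; the Python raises there, excluded by Pre_)
def pvCountA (dg : List (Int × List Int)) (cv : List Int) : Option (PySem.Dict (List Int) Int) :=
  cv.foldl (fun acc vert =>
      match acc, pvDegLookup dg vert with
      | some d, some t =>
          some (if d.contains t = false then d.insert t 1 else d.insert t (d.getD t 0 + 1))
      | _, _ => none)
    (some PySem.Dict.empty)

-- Python 'dict1 == dict2' (order-insensitive): same key set and same value at every key
def pvDictPyEq (d1 d2 : PySem.Dict (List Int) Int) : Bool :=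
  PySem.Set.equal d1.keys d2.keys && d1.keys.all (fun k => d1.getD k 0 == d2.getD k 0)

def vertices_check_directed (connected_vert_1 : List Int) (connected_vert_2 : List Int) (deg_graph_1 : List (Int × List Int)) (deg_graph_2 : List (Int × List Int)) : Bool :=
  match pvCountA deg_graph_1 connected_vert_1, pvCountA deg_graph_2 connected_vert_2 with
  | some d1, some d2 => if pvDictPyEq d1 d2 then true else false
  | _, _ => false   -- unreachable under Pre_: the Python raised KeyError

-- ===== PORT B =====
-- '[tuple(deg_graph[v]) for v in connected_vert]' built left to right (none = KeyError)
def pvDegSeq (dg : List (Int × List Int)) (cv : List Int) : Option (List (List Int)) :=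
  cv.foldr (fun v acc =>
      match pvDegLookup dg v, acc with
      | some t, some l => some (t :: l)
      | _, _ => none)
    (some [])

def vertices_check_directed_alt (connected_vert_1 : List Int) (connected_vert_2 : List Int) (deg_graph_1 : List (Int × List Int)) (deg_graph_2 : List (Int × List Int)) : Bool :=
  match pvDegSeq deg_graph_1 connected_vert_1, pvDegSeq deg_graph_2 connected_vert_2 with
  | some l1, some l2 =>
      PySem.List.sorted l1 (fun x => x) == PySem.List.sorted l2 (fun x => x)
  | _, _ => false   -- unreachable under Pre_: the Python raised KeyError

-- ===== PRECONDITION & SPEC =====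
-- Pre_ excludes exactly the inputs on which the Python raises KeyError:
-- every listed adjacent vertex must be a key of its degree dict.
def Pre_vertices_check_directed (connected_vert_1 : List Int) (connected_vert_2 : List Int) (deg_graph_1 : List (Int × List Int)) (deg_graph_2 : List (Int × List Int)) : Prop :=
  (∀ v ∈ connected_vert_1, v ∈ deg_graph_1.map Prod.fst) ∧
  (∀ v ∈ connected_vert_2, v ∈ deg_graph_2.map Prod.fst)
instance (connected_vert_1 : List Int) (connected_vert_2 : List Int) (deg_graph_1 : List (Int × List Int)) (deg_graph_2 : List (Int × List Int)) : Decidable (Pre_vertices_check_directed connected_vert_1 connected_vert_2 deg_graph_1 deg_graph_2) := by unfold Pre_vertices_check_directed; infer_instance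

def pvWitness_vertices_check_directed : List Int × List Int × (List (Int × List Int)) × (List (Int × List Int)) :=
  ([1, 1], [2], [(1, [0, 1])], [(2, [0, 1]), (3, [2])])

def Spec_vertices_check_directed (connected_vert_1 : List Int) (connected_vert_2 : List Int) (deg_graph_1 : List (Int × List Int)) (deg_graph_2 : List (Int × List Int)) (out : Bool) : Prop := out = vertices_check_directed_alt connected_vert_1 connected_vert_2 deg_graph_1 deg_graph_2
instance (connected_vert_1 : List Int) (connected_vert_2 : List Int) (deg_graph_1 : List (Int × List Int)) (deg_graph_2 : List (Int × List Int)) (out : Bool) : Decidable (Spec_vertices_check_directed connected_vert_1 connected_vert_2 deg_graph_1 deg_graph_2 out) := by unfold Spec_vertices_check_directed; infer_instance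

-- ===== CLAIM (what is proved, stated in full; the proofs are below) =====
def Claim_equal_vertices_check_directed : Prop := ∀ (connected_vert_1 : List Int) (connected_vert_2 : List Int) (deg_graph_1 : List (Int × List Int)) (deg_graph_2 : List (Int × List Int)), Dom_vertices_check_directed connected_vert_1 connected_vert_2 deg_graph_1 deg_graph_2 → Pre_vertices_check_directed connected_vert_1 connected_vert_2 deg_graph_1 deg_graph_2 → Spec_vertices_check_directed connected_vert_1 connected_vert_2 deg_graph_1 deg_graph_2 (vertices_check_directed connected_vert_1 connected_vert_2 deg_graph_1 deg_graph_2)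

-- ===== LEMMAS AND PROOFS =====

-- the looked-up degree list, total under Pre_ (proof-only helper)
def pvDeg (dg : List (Int × List Int)) (v : Int) : List Int :=
  (pvDegLookup dg v).getD []

theorem pvDegLookup_isSome {dg : List (Int × List Int)} {v : Int}
    (h : v ∈ dg.map Prod.fst) : pvDegLookup dg v = some (pvDeg dg v) := by
  induction dg with
  | nil => simp at h
  | cons p rest ih =>
    by_cases hv : v = p.1
    · simp [pvDegLookup, pvDeg, List.lookup, hv]
    · have hm : v ∈ rest.map Prod.fst := by
        simp only [List.map_cons, List.mem_cons] at h
        exact h.resolve_left hv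
      have hb : (v == p.1) = false := by simp [hv]
      have hrec := ih hm
      simp only [pvDegLookup, pvDeg, List.lookup, hb] at hrec ⊢
      exact hrec

theorem pvDegSeq_eq_map {dg : List (Int × List Int)} {cv : List Int}
    (h : ∀ v ∈ cv, v ∈ dg.map Prod.fst) :
    pvDegSeq dg cv = some (cv.map (pvDeg dg)) := by
  induction cv with
  | nil => rfl
  | cons v rest ih =>
    have hv := pvDegLookup_isSome (h v (by simp))
    have hrest := ih (fun w hw => h w (by simp [hw]))
    simp [pvDegSeq] at hrest
    simp [pvDegSeq, hv, hrest]

theorem pvCountA_foldl_aux {dg : List (Int × List Int)} {cv : List Int}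
    (h : ∀ v ∈ cv, v ∈ dg.map Prod.fst) (d : PySem.Dict (List Int) Int) :
    cv.foldl (fun acc vert =>
      match acc, pvDegLookup dg vert with
      | some d, some t =>
          some (if d.contains t = false then d.insert t 1 else d.insert t (d.getD t 0 + 1))
      | _, _ => none) (some d)
    = some ((cv.map (pvDeg dg)).foldl (fun d t => d.insert t (d.getD t 0 + 1)) d) := by
  induction cv generalizing d with
  | nil => rfl
  | cons v rest ih =>
    have hv := pvDegLookup_isSome (h v (by simp))
    have step : (if d.contains (pvDeg dg v) = false then d.insert (pvDeg dg v) 1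
        else d.insert (pvDeg dg v) (d.getD (pvDeg dg v) 0 + 1))
        = d.insert (pvDeg dg v) (d.getD (pvDeg dg v) 0 + 1) := by
      by_cases hc : d.contains (pvDeg dg v) = false
      · simp [hc, PySem.Dict.getD_of_not_contains d 0 hc]
      · simp [hc]
    simp only [List.foldl_cons, List.map_cons, hv, step]
    exact ih (fun w hw => h w (by simp [hw])) _

theorem pvCountA_eq_counter {dg : List (Int × List Int)} {cv : List Int}
    (h : ∀ v ∈ cv, v ∈ dg.map Prod.fst) :
    pvCountA dg cv = some (PySem.Dict.counter (cv.map (pvDeg dg))) := by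
  unfold pvCountA
  rw [pvCountA_foldl_aux h, PySem.Dict.foldl_insert_getD_add_one_eq_counter]

theorem pvDictPyEq_counter_iff (xs ys : List (List Int)) :
    pvDictPyEq (PySem.Dict.counter xs) (PySem.Dict.counter ys) = true ↔ xs.Perm ys := by
  unfold pvDictPyEq
  rw [Bool.and_eq_true, PySem.Dict.keys_counter, PySem.Dict.keys_counter,
    PySem.Set.equal_iff, List.all_eq_true]
  constructor
  · rintro ⟨hk, hv⟩
    rw [List.perm_iff_count]
    intro a
    by_cases ha : a ∈ xs
    · have := hv a ((PySem.Set.mem_ofList xs a).2 ha)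
      rw [beq_iff_eq, PySem.Dict.getD_counter, PySem.Dict.getD_counter] at this
      exact_mod_cast this
    · have hay : a ∉ ys := fun hy => ha ((PySem.Set.mem_ofList xs a).1
        ((hk a).2 ((PySem.Set.mem_ofList ys a).2 hy)))
      simp [List.count_eq_zero_of_not_mem, ha, hay]
  · intro hp
    have hc := List.perm_iff_count.1 hp
    refine ⟨fun a => by
        rw [PySem.Set.mem_ofList, PySem.Set.mem_ofList]
        exact ⟨fun hx => hp.mem_iff.1 hx, fun hy => hp.mem_iff.2 hy⟩,
      fun a _ => by
        rw [beq_iff_eq, PySem.Dict.getD_counter, PySem.Dict.getD_counter]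
        exact_mod_cast hc a⟩

-- the port's default Decidable instance for the lexicographic order equals the LinearOrder one
theorem pvSorted_inst_bridge (l : List (List Int)) :
    @PySem.List.sorted (List Int) (List Int) List.instLT (fun a b => a.decidableLT b) l (fun x => x) false
      = @PySem.List.sorted (List Int) (List Int) List.instLinearOrder.toLT
          (@LinearOrder.toDecidableLT _ List.instLinearOrder) l (fun x => x) false := by
  have h : (fun a b : List Int => a.decidableLT b)
      = (@LinearOrder.toDecidableLT _ List.instLinearOrder) := by
    funext a b; exact Subsingleton.elim _ _
  exact congrArg (fun d => @PySem.List.sorted (List Int) (List Int) List.instLT d l (fun x => x) false) h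

-- ===== VERDICT (by name: the statement is the Claim_ definition above) =====
theorem vertices_check_directed_spec : Claim_equal_vertices_check_directed := by
  intro cv1 cv2 dg1 dg2 _ hpre
  obtain ⟨h1, h2⟩ := hpre
  unfold Spec_vertices_check_directed vertices_check_directed vertices_check_directed_alt
  rw [pvCountA_eq_counter h1, pvCountA_eq_counter h2, pvDegSeq_eq_map h1, pvDegSeq_eq_map h2]
  simp only []
  rw [pvSorted_inst_bridge, pvSorted_inst_bridge]
  by_cases hperm : (cv1.map (pvDeg dg1)).Perm (cv2.map (pvDeg dg2))
  · rw [if_pos ((pvDictPyEq_counter_iff _ _).2 hperm)]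
    exact (beq_iff_eq.2 ((PySem.List.sorted_id_eq_sorted_id_iff_perm _ _).2 hperm)).symm
  · rw [if_neg (fun h => hperm ((pvDictPyEq_counter_iff _ _).1 h))]
    symm
    rw [beq_eq_false_iff_ne]
    exact fun h => hperm ((PySem.List.sorted_id_eq_sorted_id_iff_perm _ _).1 h)
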